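-- pv_equiv track=rewrite | github.com/wallaby150/TIL | Algorithm/푼 거/16205_변수명.py | convert_to_cases
-- ===== SOURCE A (Python) =====
-- def convert_to_cases(t, s):
--     if t == 1:  # camelCase
--         words = []
--         current = ""
--         for char in s:
--             if char.isupper():
--                 if current:
--                     words.append(current)
--                 current = char.lower()
--             else:
--                 current += char
--         words.append(current)
--     elif t == 2:  # snake_case
--         words = s.split('_')
--     elif t == 3:  # PascalCase
--         words = []
--         current = ""
--         for char in s:
--             if char.isupper():
--                 if current:
--                     words.append(current)
--                 current = char.lower()
--             else:
--                 current += char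
--         words.append(current)
--
--     camel_case = words[0] + ''.join(word.capitalize() for word in words[1:])
--     snake_case = '_'.join(words).lower()
--     pascal_case = ''.join(word.capitalize() for word in words)
--
--     return camel_case, snake_case, pascal_case
-- ===== SOURCE B (Python) =====
-- def _words(s):
--     # insert a marker (a char that cannot occur in the input) before each
--     # uppercase char while lowercasing it, then split on the marker
--     marked = ''.join('\x00' + c.lower() if c.isupper() else c for c in s)
--     words = marked.split('\x00')
--     if len(words) > 1 and words[0] == '':
--         words = words[1:]
--     return words
--
--
-- def convert_to_cases(t, s):
--     if t == 1:  # camelCase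
--         words = _words(s)
--     elif t == 2:  # snake_case
--         words = s.split('_')
--     elif t == 3:  # PascalCase
--         words = _words(s)
--
--     camel_case = words[0] + ''.join(word.capitalize() for word in words[1:])
--     snake_case = '_'.join(words).lower()
--     pascal_case = ''.join(word.capitalize() for word in words)
--
--     return camel_case, snake_case, pascal_case
-- ===== Notes on version B (the rewrite author's own statement) =====
-- stated objective: alternative
-- what changed: Replaces A's character-by-character accumulator loop (current word + words list) with a string transformation: insert a marker before each uppercase char while lowercasing it, split on the marker, and drop the single spurious leading empty word; the t==2 branch and the three output joins are unchanged.
import Mathlib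
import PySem

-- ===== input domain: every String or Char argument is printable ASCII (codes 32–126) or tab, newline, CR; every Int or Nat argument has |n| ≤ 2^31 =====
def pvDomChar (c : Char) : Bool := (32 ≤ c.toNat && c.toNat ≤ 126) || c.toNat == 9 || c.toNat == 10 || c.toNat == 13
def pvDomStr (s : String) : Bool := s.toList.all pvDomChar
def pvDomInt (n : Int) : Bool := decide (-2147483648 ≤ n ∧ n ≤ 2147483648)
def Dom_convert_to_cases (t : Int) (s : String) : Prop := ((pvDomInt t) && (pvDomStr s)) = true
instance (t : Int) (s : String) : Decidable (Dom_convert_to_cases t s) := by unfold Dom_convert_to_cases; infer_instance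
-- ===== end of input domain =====

-- B extracts the words for t=1/t=3 by marker-insertion + split instead of A's accumulator loop
-- (objective: alternative decomposition, same cost); outputs and the t=2 branch are the same lines.


-- ===== PORT A =====
-- word.capitalize() (ASCII: first char uppercased, rest lowered) — exact on the Dom alphabet
def pvCap (w : List Char) : List Char :=
  match w with
  | [] => []
  | c :: rest => PySem.Chars.upperChar c :: PySem.Chars.lower rest

-- the three identical result lines both Pythons end with (camel, snake, pascal)
def pvOutputs (words : List (List Char)) : String × String × String :=
  (String.ofList (words.headD [] ++ PySem.Chars.join [] ((words.drop 1).map pvCap)),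
   String.ofList (PySem.Chars.lower (PySem.Chars.join ['_'] words)),
   String.ofList (PySem.Chars.join [] (words.map pvCap)))

-- one iteration of A's 'for char in s' loop; state = (words, current)
def pvStepA (st : List (List Char) × List Char) (c : Char) : List (List Char) × List Char :=
  if PySem.Chars.isupper c then
    (if st.2 ≠ [] then st.1 ++ [st.2] else st.1, [PySem.Chars.lowerChar c])
  else (st.1, st.2 ++ [c])

-- A's t==1 / t==3 word extraction: run the loop, then words.append(current)
def pvWordsA (s : String) : List (List Char) :=
  (s.toList.foldl pvStepA ([], [])).1 ++ [(s.toList.foldl pvStepA ([], [])).2]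

def convert_to_cases (t : Int) (s : String) : String × String × String :=
  if t = 1 then pvOutputs (pvWordsA s)
  else if t = 2 then pvOutputs (PySem.Chars.splitOn s.toList ['_'])
  else if t = 3 then pvOutputs (pvWordsA s)
  else ("", "", "")  -- Python raises NameError here; excluded by Pre_

-- ===== PORT B =====
def pvMarker : Char := Char.ofNat 0

-- ''.join('\x00' + c.lower() if c.isupper() else c for c in s)
def pvMark (l : List Char) : List Char :=
  l.flatMap (fun c => if PySem.Chars.isupper c then [pvMarker, PySem.Chars.lowerChar c] else [c])

-- B's _words helper: mark, split on the marker, drop the spurious leading empty word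
def pvWordsB (s : String) : List (List Char) :=
  let words := PySem.Chars.splitOn (pvMark s.toList) [pvMarker]
  if 1 < words.length ∧ words.headD [] = [] then words.drop 1 else words

def convert_to_cases_alt (t : Int) (s : String) : String × String × String :=
  if t = 1 then pvOutputs (pvWordsB s)
  else if t = 2 then pvOutputs (PySem.Chars.splitOn s.toList ['_'])
  else if t = 3 then pvOutputs (pvWordsB s)
  else ("", "", "")  -- Python raises NameError here; excluded by Pre_

-- ===== PRECONDITION & SPEC =====
-- Both Pythons raise NameError ('words' never assigned) for any t outside {1,2,3}; Pre_ excludes exactly those.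
def Pre_convert_to_cases (t : Int) (s : String) : Prop := t = 1 ∨ t = 2 ∨ t = 3
instance (t : Int) (s : String) : Decidable (Pre_convert_to_cases t s) := by unfold Pre_convert_to_cases; infer_instance
def pvWitness_convert_to_cases : Int × String := (1, "fooBarBaz")

def Spec_convert_to_cases (t : Int) (s : String) (out : String × String × String) : Prop := out = convert_to_cases_alt t s
instance (t : Int) (s : String) (out : String × String × String) : Decidable (Spec_convert_to_cases t s out) := by unfold Spec_convert_to_cases; infer_instance

-- ===== CLAIM (what is proved, stated in full; the proofs are below) =====
def Claim_equal_convert_to_cases : Prop := ∀ (t : Int) (s : String), Dom_convert_to_cases t s → Pre_convert_to_cases t s → Spec_convert_to_cases t s (convert_to_cases t s)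

-- ===== LEMMAS AND PROOFS =====

-- split on a single marker char
-- written as the structural recursion both word extractions are reduced to
def pvSplit1 (m : Char) (cur : List Char) : List Char → List (List Char)
  | [] => [cur]
  | c :: rest => if m = c then cur :: pvSplit1 m [] rest else pvSplit1 m (cur ++ [c]) rest

lemma pvSplit1_cons_eq (m : Char) (cur l : List Char) :
    pvSplit1 m cur (m :: l) = cur :: pvSplit1 m [] l := by simp [pvSplit1]

lemma pvSplit1_cons_ne (m c : Char) (cur l : List Char) (h : m ≠ c) :
    pvSplit1 m cur (c :: l) = pvSplit1 m (cur ++ [c]) l := by simp [pvSplit1, h]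

lemma pvSplit1_ne_nil (m : Char) (cur : List Char) (l : List Char) : pvSplit1 m cur l ≠ [] := by
  induction l generalizing cur with
  | nil => simp [pvSplit1]
  | cons c rest ih =>
    simp only [pvSplit1]
    split
    · simp
    · exact ih _

lemma pvSplit1_head (m : Char) (cur : List Char) (l : List Char) :
    ∃ w ws, pvSplit1 m cur l = (cur ++ w) :: ws := by
  induction l generalizing cur with
  | nil => exact ⟨[], [], by simp [pvSplit1]⟩
  | cons c rest ih =>
    simp only [pvSplit1]
    split
    · exact ⟨[], pvSplit1 m [] rest, by simp⟩
    · obtain ⟨w, ws, h⟩ := ih (cur ++ [c])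
      exact ⟨c :: w, ws, by simpa using h⟩

lemma pvMark_cons (c : Char) (rest : List Char) :
    pvMark (c :: rest) =
      (if PySem.Chars.isupper c then [pvMarker, PySem.Chars.lowerChar c] else [c]) ++ pvMark rest := by
  simp [pvMark]

lemma go_single (m : Char) (fuel : Nat) : ∀ (l cur : List Char) (acc : List (List Char)),
    l.length < fuel →
    PySem.Chars.splitOn.go [m] fuel l cur acc = acc.reverse ++ pvSplit1 m cur.reverse l := by
  induction fuel with
  | zero => intro l cur acc h; omega
  | succ n ih =>
    intro l cur acc h
    cases l with
    | nil =>
      rw [PySem.Chars.splitOn.go]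
      all_goals simp [pvSplit1]
    | cons c rest =>
      rw [PySem.Chars.splitOn.go]
      have hp : [m].isPrefixOf (c :: rest) = (m == c) := by simp [List.isPrefixOf]
      have hlt : rest.length < n := by simp only [List.length_cons] at h; omega
      by_cases hm : m = c
      · rw [hp, if_pos (by simp [hm]), ih _ _ _ (by simpa using hlt)]
        simp [pvSplit1, hm]
      · rw [hp, if_neg (by simp [hm]), ih _ _ _ hlt]
        simp [pvSplit1, hm]

lemma splitOn_single (m : Char) (cs : List Char) :
    PySem.Chars.splitOn cs [m] = pvSplit1 m [] cs := by
  rw [PySem.Chars.splitOn, go_single m _ _ _ _ (by omega)]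
  rfl

lemma marker_ne (c : Char) (h : pvDomChar c = true) : pvMarker ≠ c := by
  intro he
  rw [← he] at h
  exact absurd h (by decide)

lemma marker_ne_lower (c : Char) (h : pvDomChar c = true) :
    pvMarker ≠ PySem.Chars.lowerChar c := by
  intro he
  by_cases hu : PySem.Chars.isupper c = true
  · have h1 : 'A' ≤ c ∧ c ≤ 'Z' := by simpa [PySem.Chars.isupper] using hu
    have hlo : 65 ≤ c.toNat := by
      have := h1.1; simp [Char.le_def] at this; exact this
    have hhi : c.toNat ≤ 90 := by
      have := h1.2; simp [Char.le_def] at this; exact this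
    have h3 : (Char.ofNat (c.toNat + 32)).toNat = c.toNat + 32 := by
      rw [Char.toNat_ofNat, if_pos (Or.inl (by omega))]
    have h0 : pvMarker.toNat = 0 := by decide
    rw [PySem.Chars.lowerChar, if_pos hu] at he
    rw [he] at h0
    omega
  · rw [PySem.Chars.lowerChar, if_neg hu] at he
    exact marker_ne c h he

lemma loopA (l : List Char) : ∀ (ws : List (List Char)) (cur : List Char),
    cur ≠ [] → (∀ c ∈ l, pvDomChar c = true) →
    (l.foldl pvStepA (ws, cur)).1 ++ [(l.foldl pvStepA (ws, cur)).2] =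
      ws ++ pvSplit1 pvMarker cur (pvMark l) := by
  induction l with
  | nil => intro ws cur _ _; simp [pvMark, pvSplit1]
  | cons c rest ih =>
    intro ws cur hcur hdom
    have hdc : pvDomChar c = true := hdom c (by simp)
    have hdrest : ∀ x ∈ rest, pvDomChar x = true := fun x hx => hdom x (by simp [hx])
    simp only [List.foldl_cons, pvStepA]
    rw [pvMark_cons]
    by_cases hu : PySem.Chars.isupper c = true
    · rw [if_pos hcur, if_pos hu, if_pos hu, List.cons_append, List.cons_append, List.nil_append,
        pvSplit1_cons_eq, pvSplit1_cons_ne _ _ _ _ (marker_ne_lower c hdc), List.nil_append,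
        ih (ws ++ [cur]) [PySem.Chars.lowerChar c] (by simp) hdrest]
      simp
    · rw [if_neg hu, if_neg hu, List.cons_append, List.nil_append,
        pvSplit1_cons_ne _ _ _ _ (marker_ne c hdc),
        ih ws (cur ++ [c]) (by simp) hdrest]

lemma words_eq (s : String) (hDom : pvDomStr s = true) : pvWordsA s = pvWordsB s := by
  have hdom : ∀ c ∈ s.toList, pvDomChar c = true := by
    simpa [pvDomStr, List.all_eq_true] using hDom
  unfold pvWordsA pvWordsB
  rw [splitOn_single]
  cases hl : s.toList with
  | nil => simp [pvMark, pvSplit1]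
  | cons c rest =>
    have hdc : pvDomChar c = true := hdom c (by simp [hl])
    have hdrest : ∀ x ∈ rest, pvDomChar x = true := fun x hx => hdom x (by simp [hl, hx])
    simp only [List.foldl_cons, pvStepA, List.nil_append]
    rw [pvMark_cons]
    by_cases hu : PySem.Chars.isupper c = true
    · rw [if_pos hu, if_neg (by simp), if_pos hu, List.cons_append, List.cons_append, List.nil_append,
        pvSplit1_cons_eq, pvSplit1_cons_ne _ _ _ _ (marker_ne_lower c hdc), List.nil_append,
        loopA rest [] [PySem.Chars.lowerChar c] (by simp) hdrest, List.nil_append]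
      have hne := pvSplit1_ne_nil pvMarker [PySem.Chars.lowerChar c] (pvMark rest)
      rw [if_pos]
      · simp
      · constructor
        · simp only [List.length_cons]
          have : (pvSplit1 pvMarker [PySem.Chars.lowerChar c] (pvMark rest)).length ≠ 0 := by
            simpa [List.length_eq_zero_iff] using hne
          omega
        · simp
    · rw [if_neg hu, if_neg hu, List.cons_append, List.nil_append,
        pvSplit1_cons_ne _ _ _ _ (marker_ne c hdc), List.nil_append,
        loopA rest [] [c] (by simp) hdrest, List.nil_append]
      obtain ⟨w, ws, hw⟩ := pvSplit1_head pvMarker [c] (pvMark rest)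
      rw [if_neg]
      rw [hw]
      simp

-- ===== VERDICT (by name: the statement is the Claim_ definition above) =====
theorem convert_to_cases_spec : Claim_equal_convert_to_cases := by
  intro t s hDom hPre
  have hS : pvDomStr s = true := by
    unfold Dom_convert_to_cases at hDom
    simp only [Bool.and_eq_true] at hDom
    exact hDom.2
  unfold Spec_convert_to_cases convert_to_cases convert_to_cases_alt
  rcases hPre with h | h | h <;> subst h <;> norm_num <;> rw [words_eq s hS]
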